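-- pv_equiv track=rewrite | github.com/memikk/ydt-vocabulary-trainer | generate_dictionary.py | guess_meaning
-- ===== SOURCE A (Python) =====
-- def guess_meaning(word, dictionary):
--     # Direct check first logic is in main loop, but here we check variations
--
--     # 1. Standard Inflections
--     if word.endswith("s"):
--         base = word[:-1]
--         if base in dictionary: return dictionary[base]
--         if word.endswith("ies"):
--             base = word[:-3] + "y"
--             if base in dictionary: return dictionary[base]
--         if word.endswith("es"):
--             base = word[:-2]
--             if base in dictionary: return dictionary[base]
--
--     if word.endswith("ed"):
--         base = word[:-2] # worked -> work
--         if base in dictionary: return dictionary[base]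
--         base = word[:-1] # lived -> live
--         if base in dictionary: return dictionary[base]
--         if len(word) > 3 and word[-3] == word[-4]: # stopped -> stop
--              base = word[:-3]
--              if base in dictionary: return dictionary[base]
--
--     if word.endswith("ing"):
--         base = word[:-3] # playing -> play
--         if base in dictionary: return dictionary[base]
--         base = word[:-3] + "e" # making -> make
--         if base in dictionary: return dictionary[base]
--         if len(word) > 4 and word[-4] == word[-5]: # sitting -> sit
--              base = word[:-4]
--              if base in dictionary: return dictionary[base]
--
--     # 2. Adverbs (-ly)
--     if word.endswith("ly"):
--         base = word[:-2] # quickly -> quick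
--         if base in dictionary: return dictionary[base]
--         if word.endswith("ily"):
--              base = word[:-3] + "y" # happily -> happy
--              if base in dictionary: return dictionary[base]
--         # Try to strip suffix from the base too? (abusively -> abusive -> abuse)
--         # Recursive attempt?
--
--     # 3. Noun/Adjective Suffixes (approximate mapping)
--     # -tion, -ment, -ance, -ence, -able, -ible, -ness, -ity
--
--     suffixes = [
--         ("tion", ""), ("tion", "te"), ("ation", "e"), # creation -> create, population -> populate
--         ("ment", ""), # achievement -> achieve
--         ("ance", ""), ("ance", "e"), # resistance -> resist
--         ("ence", ""), ("ence", "e"), # dependence -> depend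
--         ("able", ""), ("able", "e"), # adaptable -> adapt
--         ("ible", ""), ("ible", "e"),
--         ("ness", ""), # happiness -> happy (handled by y->i rule often but let's see)
--         ("ity", "e"), ("ity", ""), # activity -> active
--         ("ive", ""), ("ive", "e"), # active -> act
--         ("al", ""), ("al", "e"), # accidental -> accident
--         ("ful", ""), # careful -> care
--         ("less", ""), # careless -> care
--         ("ous", ""), ("ous", "e"), # famous -> fame
--     ]
--
--     for suffix, replacement in suffixes:
--         if word.endswith(suffix):
--             base = word[:-len(suffix)] + replacement
--             if base in dictionary: return dictionary[base]
--
--             # Double suffix check? (realistically too expensive/noisy)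
--
--     return None
-- ===== SOURCE B (Python) =====
-- SUFFIXES = [
--     ("tion", ""), ("tion", "te"), ("ation", "e"),
--     ("ment", ""),
--     ("ance", ""), ("ance", "e"),
--     ("ence", ""), ("ence", "e"),
--     ("able", ""), ("able", "e"),
--     ("ible", ""), ("ible", "e"),
--     ("ness", ""),
--     ("ity", "e"), ("ity", ""),
--     ("ive", ""), ("ive", "e"),
--     ("al", ""), ("al", "e"),
--     ("ful", ""),
--     ("less", ""),
--     ("ous", ""), ("ous", "e"),
-- ]
--
--
-- def _candidates(word):
--     """Ordered list of candidate base forms for word (bases only, no lookups)."""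
--     cands = []
--     if word.endswith("s"):
--         cands.append(word[:-1])
--         if word.endswith("ies"):
--             cands.append(word[:-3] + "y")
--         if word.endswith("es"):
--             cands.append(word[:-2])
--     if word.endswith("ed"):
--         cands.append(word[:-2])
--         cands.append(word[:-1])
--         if len(word) > 3 and word[-3] == word[-4]:
--             cands.append(word[:-3])
--     if word.endswith("ing"):
--         cands.append(word[:-3])
--         cands.append(word[:-3] + "e")
--         if len(word) > 4 and word[-4] == word[-5]:
--             cands.append(word[:-4])
--     if word.endswith("ly"):
--         cands.append(word[:-2])
--         if word.endswith("ily"):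
--             cands.append(word[:-3] + "y")
--     cands.extend(word[:-len(suf)] + rep for suf, rep in SUFFIXES if word.endswith(suf))
--     return cands
--
--
-- def guess_meaning(word, dictionary):
--     return next((dictionary[b] for b in _candidates(word) if b in dictionary), None)
-- ===== Notes on version B (the rewrite author's own statement) =====
-- stated objective: simpler
-- what changed: B separates candidate generation from lookup: it first builds the ordered list of candidate base forms (pure string work), then a single first-match loop over that list does all dictionary lookups, replacing A's interleaved guard-lookup-early-return cascade.
import Mathlib
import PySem

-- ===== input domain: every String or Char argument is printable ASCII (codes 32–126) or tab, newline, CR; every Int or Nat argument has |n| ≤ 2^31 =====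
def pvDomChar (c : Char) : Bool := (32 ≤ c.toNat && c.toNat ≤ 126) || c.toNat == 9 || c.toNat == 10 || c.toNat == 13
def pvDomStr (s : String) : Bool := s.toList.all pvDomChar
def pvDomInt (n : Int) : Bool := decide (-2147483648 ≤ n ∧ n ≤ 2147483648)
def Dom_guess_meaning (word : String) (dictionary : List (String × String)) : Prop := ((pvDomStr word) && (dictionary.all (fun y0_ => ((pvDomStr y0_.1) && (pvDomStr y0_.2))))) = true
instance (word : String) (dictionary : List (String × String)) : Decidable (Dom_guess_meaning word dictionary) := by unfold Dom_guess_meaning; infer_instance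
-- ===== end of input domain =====

-- B separates candidate generation from dictionary lookup (simpler decomposition); same return value as A.

-- ===== PORT A =====
-- dict membership check + dictionary[base]: first matching key in the association list
def gmLookup (d : List (String × String)) (b : List Char) : Option String :=
  (d.find? (fun p => p.1.toList == b)).map (·.2)

-- the suffixes table of A (shared verbatim by B's port)
def gmSuffixes : List (List Char × List Char) :=
  [("tion".toList, "".toList), ("tion".toList, "te".toList), ("ation".toList, "e".toList),
   ("ment".toList, "".toList),
   ("ance".toList, "".toList), ("ance".toList, "e".toList),
   ("ence".toList, "".toList), ("ence".toList, "e".toList),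
   ("able".toList, "".toList), ("able".toList, "e".toList),
   ("ible".toList, "".toList), ("ible".toList, "e".toList),
   ("ness".toList, "".toList),
   ("ity".toList, "e".toList), ("ity".toList, "".toList),
   ("ive".toList, "".toList), ("ive".toList, "e".toList),
   ("al".toList, "".toList), ("al".toList, "e".toList),
   ("ful".toList, "".toList),
   ("less".toList, "".toList),
   ("ous".toList, "".toList), ("ous".toList, "e".toList)]

-- A's `for suffix, replacement in suffixes: ... return ...` loop with early return
def gmLoopA (d : List (String × String)) (w : List Char) :
    List (List Char × List Char) → Option String
  | [] => none
  | (suf, rep) :: rest =>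
    if PySem.Chars.endswith w suf then
      match gmLookup d (PySem.List.slice w none (some (-(suf.length : Int))) ++ rep) with
      | some v => some v
      | none => gmLoopA d w rest
    else gmLoopA d w rest

-- block "1. Standard Inflections", the `endswith("s")` cascade
def gmBlockS (d : List (String × String)) (w : List Char) : Option String :=
  if PySem.Chars.endswith w "s".toList then
    match gmLookup d (PySem.List.slice w none (some (-1))) with
    | some v => some v
    | none =>
      match (if PySem.Chars.endswith w "ies".toList then
               gmLookup d (PySem.List.slice w none (some (-3)) ++ "y".toList) else none) with
      | some v => some v
      | none =>
        if PySem.Chars.endswith w "es".toList then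
          gmLookup d (PySem.List.slice w none (some (-2))) else none
  else none

-- the `endswith("ed")` cascade
def gmBlockEd (d : List (String × String)) (w : List Char) : Option String :=
  if PySem.Chars.endswith w "ed".toList then
    match gmLookup d (PySem.List.slice w none (some (-2))) with
    | some v => some v
    | none =>
      match gmLookup d (PySem.List.slice w none (some (-1))) with
      | some v => some v
      | none =>
        if decide (3 < w.length) && (PySem.List.pyGet? w (-3) == PySem.List.pyGet? w (-4)) then
          gmLookup d (PySem.List.slice w none (some (-3))) else none
  else none

-- the `endswith("ing")` cascade
def gmBlockIng (d : List (String × String)) (w : List Char) : Option String :=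
  if PySem.Chars.endswith w "ing".toList then
    match gmLookup d (PySem.List.slice w none (some (-3))) with
    | some v => some v
    | none =>
      match gmLookup d (PySem.List.slice w none (some (-3)) ++ "e".toList) with
      | some v => some v
      | none =>
        if decide (4 < w.length) && (PySem.List.pyGet? w (-4) == PySem.List.pyGet? w (-5)) then
          gmLookup d (PySem.List.slice w none (some (-4))) else none
  else none

-- block "2. Adverbs (-ly)"
def gmBlockLy (d : List (String × String)) (w : List Char) : Option String :=
  if PySem.Chars.endswith w "ly".toList then
    match gmLookup d (PySem.List.slice w none (some (-2))) with
    | some v => some v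
    | none =>
      if PySem.Chars.endswith w "ily".toList then
        gmLookup d (PySem.List.slice w none (some (-3)) ++ "y".toList) else none
  else none

def guess_meaning (word : String) (dictionary : List (String × String)) : Option String :=
  match gmBlockS dictionary word.toList with
  | some v => some v
  | none =>
    match gmBlockEd dictionary word.toList with
    | some v => some v
    | none =>
      match gmBlockIng dictionary word.toList with
      | some v => some v
      | none =>
        match gmBlockLy dictionary word.toList with
        | some v => some v
        | none => gmLoopA dictionary word.toList gmSuffixes

-- ===== PORT B =====
-- _candidates(word): the ordered list of candidate base forms, no lookups
def gmCandidates (w : List Char) : List (List Char) :=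
  (if PySem.Chars.endswith w "s".toList then
     [PySem.List.slice w none (some (-1))]
     ++ (if PySem.Chars.endswith w "ies".toList then
           [PySem.List.slice w none (some (-3)) ++ "y".toList] else [])
     ++ (if PySem.Chars.endswith w "es".toList then
           [PySem.List.slice w none (some (-2))] else [])
   else [])
  ++ (if PySem.Chars.endswith w "ed".toList then
        [PySem.List.slice w none (some (-2)), PySem.List.slice w none (some (-1))]
        ++ (if decide (3 < w.length) && (PySem.List.pyGet? w (-3) == PySem.List.pyGet? w (-4)) then
              [PySem.List.slice w none (some (-3))] else [])
      else [])
  ++ (if PySem.Chars.endswith w "ing".toList then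
        [PySem.List.slice w none (some (-3)),
         PySem.List.slice w none (some (-3)) ++ "e".toList]
        ++ (if decide (4 < w.length) && (PySem.List.pyGet? w (-4) == PySem.List.pyGet? w (-5)) then
              [PySem.List.slice w none (some (-4))] else [])
      else [])
  ++ (if PySem.Chars.endswith w "ly".toList then
        [PySem.List.slice w none (some (-2))]
        ++ (if PySem.Chars.endswith w "ily".toList then
              [PySem.List.slice w none (some (-3)) ++ "y".toList] else [])
      else [])
  ++ gmSuffixes.filterMap (fun sr =>
       if PySem.Chars.endswith w sr.1 then
         some (PySem.List.slice w none (some (-(sr.1.length : Int))) ++ sr.2)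
       else none)

-- next((dictionary[b] for b in candidates if b in dictionary), None)
def gmFirst (d : List (String × String)) : List (List Char) → Option String
  | [] => none
  | b :: bs =>
    match gmLookup d b with
    | some v => some v
    | none => gmFirst d bs

def guess_meaning_alt (word : String) (dictionary : List (String × String)) : Option String :=
  gmFirst dictionary (gmCandidates word.toList)

-- ===== PRECONDITION & SPEC =====
def Spec_guess_meaning (word : String) (dictionary : List (String × String)) (out : Option String) : Prop := out = guess_meaning_alt word dictionary
instance (word : String) (dictionary : List (String × String)) (out : Option String) : Decidable (Spec_guess_meaning word dictionary out) := by unfold Spec_guess_meaning; infer_instance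

-- ===== CLAIM (what is proved, stated in full; the proofs are below) =====
def Claim_equal_guess_meaning : Prop := ∀ (word : String) (dictionary : List (String × String)), Dom_guess_meaning word dictionary → Spec_guess_meaning word dictionary (guess_meaning word dictionary)

-- ===== LEMMAS AND PROOFS =====
theorem gmFirst_cons (d : List (String × String)) (b : List Char) (bs : List (List Char)) :
    gmFirst d (b :: bs) =
      match gmLookup d b with
      | some v => some v
      | none => gmFirst d bs := rfl

theorem gmOptMatchId (o : Option String) :
    (match o with | some v => some v | none => (none : Option String)) = o := by
  cases o <;> rfl

theorem gmFirst_append (d : List (String × String)) (xs ys : List (List Char)) :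
    gmFirst d (xs ++ ys) =
      match gmFirst d xs with
      | some v => some v
      | none => gmFirst d ys := by
  induction xs with
  | nil => simp [gmFirst]
  | cons b bs ih =>
    simp only [List.cons_append, gmFirst_cons, ih]
    cases gmLookup d b <;> rfl

theorem gmLoopA_eq (d : List (String × String)) (w : List Char)
    (sufs : List (List Char × List Char)) :
    gmLoopA d w sufs =
      gmFirst d (sufs.filterMap (fun sr =>
        if PySem.Chars.endswith w sr.1 then
          some (PySem.List.slice w none (some (-(sr.1.length : Int))) ++ sr.2)
        else none)) := by
  induction sufs with
  | nil => rfl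
  | cons sr rest ih =>
    obtain ⟨suf, rep⟩ := sr
    by_cases h : PySem.Chars.endswith w suf
    · simp only [gmLoopA, List.filterMap_cons, h, if_pos, gmFirst_cons, ih]
    · simp [gmLoopA, h, ih]

theorem gmBlockS_eq (d : List (String × String)) (w : List Char) :
    gmBlockS d w =
      gmFirst d (if PySem.Chars.endswith w "s".toList then
        [PySem.List.slice w none (some (-1))]
        ++ (if PySem.Chars.endswith w "ies".toList then
              [PySem.List.slice w none (some (-3)) ++ "y".toList] else [])
        ++ (if PySem.Chars.endswith w "es".toList then
              [PySem.List.slice w none (some (-2))] else [])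
      else []) := by
  unfold gmBlockS
  split_ifs <;> simp [gmFirst, gmOptMatchId]

theorem gmBlockEd_eq (d : List (String × String)) (w : List Char) :
    gmBlockEd d w =
      gmFirst d (if PySem.Chars.endswith w "ed".toList then
        [PySem.List.slice w none (some (-2)), PySem.List.slice w none (some (-1))]
        ++ (if decide (3 < w.length) && (PySem.List.pyGet? w (-3) == PySem.List.pyGet? w (-4)) then
              [PySem.List.slice w none (some (-3))] else [])
      else []) := by
  unfold gmBlockEd
  split_ifs <;> simp [gmFirst, gmOptMatchId]

theorem gmBlockIng_eq (d : List (String × String)) (w : List Char) :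
    gmBlockIng d w =
      gmFirst d (if PySem.Chars.endswith w "ing".toList then
        [PySem.List.slice w none (some (-3)),
         PySem.List.slice w none (some (-3)) ++ "e".toList]
        ++ (if decide (4 < w.length) && (PySem.List.pyGet? w (-4) == PySem.List.pyGet? w (-5)) then
              [PySem.List.slice w none (some (-4))] else [])
      else []) := by
  unfold gmBlockIng
  split_ifs <;> simp [gmFirst, gmOptMatchId]

theorem gmBlockLy_eq (d : List (String × String)) (w : List Char) :
    gmBlockLy d w =
      gmFirst d (if PySem.Chars.endswith w "ly".toList then
        [PySem.List.slice w none (some (-2))]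
        ++ (if PySem.Chars.endswith w "ily".toList then
              [PySem.List.slice w none (some (-3)) ++ "y".toList] else [])
      else []) := by
  unfold gmBlockLy
  split_ifs <;> simp [gmFirst, gmOptMatchId]

-- ===== VERDICT (by name: the statement is the Claim_ definition above) =====
theorem guess_meaning_spec : Claim_equal_guess_meaning := by
  intro word dictionary _
  unfold Spec_guess_meaning guess_meaning guess_meaning_alt gmCandidates
  rw [gmFirst_append, gmFirst_append, gmFirst_append, gmFirst_append,
      ← gmBlockS_eq, ← gmBlockEd_eq, ← gmBlockIng_eq, ← gmBlockLy_eq, ← gmLoopA_eq]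
  cases gmBlockS dictionary word.toList <;>
  cases gmBlockEd dictionary word.toList <;>
  cases gmBlockIng dictionary word.toList <;>
  cases gmBlockLy dictionary word.toList <;> rfl
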